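-- pv_equiv track=rewrite | github.com/lhs8701/algorithm-study | 백준/Silver/1302. 베스트셀러/베스트셀러.py | best_seller
-- ===== SOURCE A (Python) =====
-- def best_seller(book_list):
--     best_check = {}
--
--     for book in book_list:
--         if book not in best_check.keys():
--             best_check[book] = 1
--         else:
--             best_check[book] += 1
--
--     best_sell_num = max(best_check.values())
--
--     best_list = [sell_book[0] for sell_book in best_check.items() if sell_book[1] == best_sell_num]
--
--     return sorted(best_list)[0]
-- ===== SOURCE B (Python) =====
-- def best_seller(book_list):
--     counts = {}
--     for book in book_list:
--         counts[book] = counts.get(book, 0) + 1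
--     best = None
--     for title, n in counts.items():
--         if best is None or n > best[1] or (n == best[1] and title < best[0]):
--             best = (title, n)
--     return best[0]
-- ===== Notes on version B (the rewrite author's own statement) =====
-- stated objective: simpler
-- what changed: replaces A's three-stage selection (max over values, comprehension filtering the tied titles, sort and take the first) with one single-pass selection loop over the counts keeping the (title, count) pair that is best under (higher count, then lexicographically smaller title)
import Mathlib
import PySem

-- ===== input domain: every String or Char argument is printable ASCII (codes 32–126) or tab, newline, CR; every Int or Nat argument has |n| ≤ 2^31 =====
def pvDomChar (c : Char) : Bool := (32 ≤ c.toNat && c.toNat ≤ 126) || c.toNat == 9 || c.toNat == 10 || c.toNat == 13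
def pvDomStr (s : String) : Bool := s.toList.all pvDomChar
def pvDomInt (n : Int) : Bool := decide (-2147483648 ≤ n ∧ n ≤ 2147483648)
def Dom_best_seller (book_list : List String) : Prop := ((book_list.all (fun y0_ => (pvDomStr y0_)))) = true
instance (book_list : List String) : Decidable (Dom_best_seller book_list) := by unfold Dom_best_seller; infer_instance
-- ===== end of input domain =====

-- B replaces A's three-stage max/filter/sort selection with one single-pass
-- selection loop over the tally; objective: simpler.

-- ===== PORT A =====
def best_seller (book_list : List String) : String :=
  let best_check := book_list.foldl
    (fun d book =>
      if !(d.contains book) then d.insert book (1 : Int)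
      else d.modify book 0 (· + 1))
    (PySem.Dict.empty)
  match PySem.List.max? (PySem.Dict.values best_check) (fun v => v) with
  | none => ""   -- max([]) raises ValueError in Python; excluded by Pre_
  | some best_sell_num =>
    let best_list := best_check.items.filterMap
      (fun sell_book => if sell_book.2 == best_sell_num then some sell_book.1 else none)
    match PySem.List.sorted best_list (fun x => x) false with
    | [] => ""   -- unreachable under Pre_ (sorted(best_list)[0] would raise)
    | m :: _ => m

-- ===== PORT B =====
def best_seller_alt (book_list : List String) : String :=
  let counts := book_list.foldl
    (fun d book => d.insert book (d.getD book 0 + 1))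
    (PySem.Dict.empty : PySem.Dict String Int)
  let best := counts.items.foldl
    (fun best p =>
      match best with
      | none => some p
      | some b => if p.2 > b.2 ∨ (p.2 = b.2 ∧ p.1 < b.1) then some p else some b)
    none
  match best with
  | some b => b.1
  | none => ""   -- Python B raises here (best is None); excluded by Pre_

-- ===== PRECONDITION & SPEC =====
-- Python A raises ValueError on the empty list (max of no values); Pre_ excludes it.
def Pre_best_seller (book_list : List String) : Prop := book_list ≠ []
instance (book_list : List String) : Decidable (Pre_best_seller book_list) := by unfold Pre_best_seller; infer_instance
def pvWitness_best_seller : List String := (["lean", "book", "lean"])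

def Spec_best_seller (book_list : List String) (out : String) : Prop := out = best_seller_alt book_list
instance (book_list : List String) (out : String) : Decidable (Spec_best_seller book_list out) := by unfold Spec_best_seller; infer_instance

-- ===== CLAIM (what is proved, stated in full; the proofs are below) =====
def Claim_equal_best_seller : Prop := ∀ (book_list : List String), Dom_best_seller book_list → Pre_best_seller book_list → Spec_best_seller book_list (best_seller book_list)

-- ===== LEMMAS AND PROOFS =====

-- the selection step of B
def pvStep (b p : String × Int) : String × Int :=
  if p.2 > b.2 ∨ (p.2 = b.2 ∧ p.1 < b.1) then p else b

lemma pvFold_some (l : List (String × Int)) (b : String × Int) :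
    l.foldl (fun best p =>
      match best with
      | none => some p
      | some b => if p.2 > b.2 ∨ (p.2 = b.2 ∧ p.1 < b.1) then some p else some b)
      (some b) = some (l.foldl pvStep b) := by
  induction l generalizing b with
  | nil => rfl
  | cons q t ih =>
      simp only [List.foldl, pvStep]
      split_ifs <;> exact ih _

lemma pvFold_mem (l : List (String × Int)) (b : String × Int) :
    l.foldl pvStep b = b ∨ l.foldl pvStep b ∈ l := by
  induction l generalizing b with
  | nil => exact Or.inl rfl
  | cons q t ih =>
      simp only [List.foldl, pvStep]
      split_ifs with h
      · rcases ih q with h' | h'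
        · exact Or.inr (by simp [h'])
        · exact Or.inr (List.mem_cons_of_mem _ h')
      · rcases ih b with h' | h'
        · exact Or.inl h'
        · exact Or.inr (List.mem_cons_of_mem _ h')

-- r = foldl pvStep b l is maximal under (snd, then min fst)
lemma pvFold_isBest (l : List (String × Int)) (b : String × Int) :
    (b.2 ≤ (l.foldl pvStep b).2 ∧
      (b.2 = (l.foldl pvStep b).2 → (l.foldl pvStep b).1 ≤ b.1)) ∧
    ∀ q ∈ l, q.2 ≤ (l.foldl pvStep b).2 ∧
      (q.2 = (l.foldl pvStep b).2 → (l.foldl pvStep b).1 ≤ q.1) := by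
  induction l generalizing b with
  | nil => exact ⟨⟨le_refl _, fun _ => le_refl _⟩, by simp⟩
  | cons q t ih =>
      simp only [List.foldl, pvStep]
      split_ifs with h
      · rcases ih q with ⟨hb, hall⟩
        refine ⟨?_, ?_⟩
        · rcases h with h | ⟨h1, h2⟩
          · exact ⟨le_trans (le_of_lt h) hb.1,
              fun he => absurd (lt_of_lt_of_le h hb.1) (by omega)⟩
          · exact ⟨h1 ▸ hb.1, fun he => le_trans (hb.2 (h1 ▸ he)) (le_of_lt h2)⟩
        · intro p hp
          rcases List.mem_cons.mp hp with hp | hp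
          · subst hp; exact hb
          · exact hall p hp
      · rcases ih b with ⟨hb, hall⟩
        refine ⟨hb, ?_⟩
        intro p hp
        rcases List.mem_cons.mp hp with hp | hp
        · subst hp
          push Not at h
          constructor
          · exact le_trans h.1 hb.1
          · intro he
            rcases lt_or_eq_of_le h.1 with hlt | heq
            · omega
            · exact le_trans (hb.2 (heq ▸ he)) (h.2 heq)
        · exact hall p hp

lemma step_eq (d : PySem.Dict String Int) (book : String) :
    (if !(d.contains book) then d.insert book (1:Int) else d.modify book 0 (· + 1))
    = d.insert book (d.getD book 0 + 1) := by
  by_cases h : d.contains book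
  · simp [h, PySem.Dict.modify, PySem.Dict.getD]
  · have hn : d.get? book = none := by
      rw [PySem.Dict.get?_eq_none_iff_contains]; simp [h]
    simp [h, PySem.Dict.getD, hn]

-- A's three-stage selection over a nonempty item list equals B's one-pass fold
lemma sel_eq (p : String × Int) (t : List (String × Int)) :
    (match PySem.List.max? ((p :: t).map Prod.snd) (fun v => v) with
     | none => ""
     | some M =>
       match PySem.List.sorted ((p :: t).filterMap
           (fun sb => if sb.2 == M then some sb.1 else none)) (fun x => x) false with
       | [] => ""
       | m :: _ => m)
    = (t.foldl pvStep p).1 := by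
  have hrmem : t.foldl pvStep p ∈ p :: t := by
    rcases pvFold_mem t p with h | h
    · rw [h]; exact List.mem_cons_self
    · exact List.mem_cons_of_mem _ h
  have hbest : ∀ q ∈ p :: t, q.2 ≤ (t.foldl pvStep p).2 ∧
      (q.2 = (t.foldl pvStep p).2 → (t.foldl pvStep p).1 ≤ q.1) := by
    intro q hq
    rcases List.mem_cons.mp hq with hq | hq
    · rw [hq]; exact (pvFold_isBest t p).1
    · exact (pvFold_isBest t p).2 q hq
  obtain ⟨M, hM⟩ : ∃ M, PySem.List.max? ((p :: t).map Prod.snd) (fun v => v) = some M := by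
    cases hmax : PySem.List.max? ((p :: t).map Prod.snd) (fun v => v) with
    | none => rw [PySem.List.max?_eq_none_iff] at hmax; simp at hmax
    | some M => exact ⟨M, rfl⟩
  rw [hM]
  show (match PySem.List.sorted ((p :: t).filterMap
      (fun sb => if sb.2 == M then some sb.1 else none)) (fun x => x) false with
    | [] => ""
    | m :: _ => m) = (t.foldl pvStep p).1
  have hMmem : M ∈ (p :: t).map Prod.snd := PySem.List.max?_mem hM
  have hMmax : ∀ v ∈ (p :: t).map Prod.snd, v ≤ M := fun v hv => PySem.List.max?_isMax hM v hv
  have hr2 : (t.foldl pvStep p).2 = M := by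
    have h1 : (t.foldl pvStep p).2 ≤ M := hMmax _ (List.mem_map_of_mem hrmem)
    obtain ⟨q, hq, hq2⟩ := List.mem_map.mp hMmem
    have h2 := (hbest q hq).1
    omega
  have hrbl : (t.foldl pvStep p).1 ∈ (p :: t).filterMap
      (fun sb => if sb.2 == M then some sb.1 else none) :=
    List.mem_filterMap.mpr ⟨t.foldl pvStep p, hrmem, by simp [hr2]⟩
  obtain ⟨m, tl, hsr⟩ : ∃ m tl, PySem.List.sorted ((p :: t).filterMap
      (fun sb => if sb.2 == M then some sb.1 else none)) (fun x => x) false = m :: tl := by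
    cases hs : PySem.List.sorted ((p :: t).filterMap
        (fun sb => if sb.2 == M then some sb.1 else none)) (fun x => x) false with
    | nil => rw [PySem.List.sorted_eq_nil_iff] at hs; rw [hs] at hrbl; simp at hrbl
    | cons m tl => exact ⟨m, tl, rfl⟩
  rw [hsr]
  show m = (t.foldl pvStep p).1
  have hmbl : m ∈ (p :: t).filterMap (fun sb => if sb.2 == M then some sb.1 else none) := by
    have hmem : m ∈ PySem.List.sorted ((p :: t).filterMap
        (fun sb => if sb.2 == M then some sb.1 else none)) (fun x => x) false := by
      rw [hsr]; exact List.mem_cons_self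
    exact (PySem.List.mem_sorted _ _ _ _).mp hmem
  have hmle : m ≤ (t.foldl pvStep p).1 := by
    simpa using PySem.List.key_head_sorted_le _ _ hsr _ hrbl
  have hrle : (t.foldl pvStep p).1 ≤ m := by
    obtain ⟨q, hq, hqif⟩ := List.mem_filterMap.mp hmbl
    have hq2 : q.2 = M := by
      by_cases hc : q.2 = M
      · exact hc
      · simp [hc] at hqif
    have hq1 : q.1 = m := by simpa [hq2] using hqif
    have hle := (hbest q hq).2 (by rw [hq2, hr2])
    rw [hq1] at hle; exact hle
  exact le_antisymm hmle hrle

lemma counter_items_ne_nil (xs : List String) (h : xs ≠ []) :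
    (PySem.Dict.counter xs).items ≠ [] := by
  rw [PySem.Dict.items_counter]
  simp only [ne_eq, List.map_eq_nil_iff]
  intro hc
  cases xs with
  | nil => exact h rfl
  | cons a t =>
      have hm : a ∈ PySem.Set.ofList (a :: t) := by
        rw [PySem.Set.mem_ofList]; exact List.mem_cons_self
      rw [hc] at hm
      simp at hm

-- ===== VERDICT (by name: the statement is the Claim_ definition above) =====
theorem best_seller_spec : Claim_equal_best_seller := by
  intro xs _ hpre
  unfold Spec_best_seller
  simp only [best_seller, best_seller_alt]
  have hstep : (fun (d : PySem.Dict String Int) (book : String) =>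
      if !(d.contains book) then d.insert book (1:Int) else d.modify book 0 (· + 1))
      = (fun (d : PySem.Dict String Int) (book : String) =>
          d.insert book (d.getD book 0 + 1)) := by
    funext d book; exact step_eq d book
  rw [hstep]
  obtain ⟨p, t, hitems⟩ : ∃ p t, (PySem.Dict.counter xs).items = p :: t := by
    cases hit : (PySem.Dict.counter xs).items with
    | nil => exact absurd hit (counter_items_ne_nil xs hpre)
    | cons p t => exact ⟨p, t, rfl⟩
  have hvals : PySem.Dict.values (PySem.Dict.counter xs)
      = (PySem.Dict.counter xs).items.map Prod.snd := rfl
  simp only [PySem.Dict.foldl_insert_getD_add_one_eq_counter, hvals, hitems]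
  have hfold : (p :: t).foldl (fun best q =>
      match best with
      | none => some q
      | some b => if q.2 > b.2 ∨ (q.2 = b.2 ∧ q.1 < b.1) then some q else some b) none
      = some (t.foldl pvStep p) := by
    rw [List.foldl_cons]; exact pvFold_some t p
  rw [hfold]
  exact sel_eq p t
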